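-- pv_equiv track=rewrite | github.com/johBac97/mirex2025-musecoco | utils_midi/remi_utils.py | from_remi_get_pitch_seq_of_multiple_insts
-- ===== SOURCE A (Python) =====
-- def from_remi_get_pitch_seq_of_multiple_insts(remi_seq, insts):
--         '''
--         Note: only works for a bar
--
--         Extract the track-wise remi sequence for a given instrument
--         From a multi-track remi sequence
--         '''
--         ret = []
--         in_seq = False
--         for tok in remi_seq:
--             if tok.startswith('i-'):
--                 if tok in insts:
--                     in_seq = True
--                 else:
--                     in_seq = False
--             elif tok.startswith('p-'):
--                 if in_seq:
--                     ret.append(tok)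
--
--         return ret
-- ===== SOURCE B (Python) =====
-- def from_remi_get_pitch_seq_of_multiple_insts(remi_seq, insts):
--     def seg_loop(seq):
--         # seq is empty or starts with an 'i-' token
--         if not seq:
--             return []
--         head, tail = seq[0], seq[1:]
--         body = []
--         k = 0
--         while k < len(tail) and not tail[k].startswith('i-'):
--             body.append(tail[k])
--             k += 1
--         rest = tail[k:]
--         out = [t for t in body if t.startswith('p-')] if head in insts else []
--         return out + seg_loop(rest)
--
--     j = 0
--     while j < len(remi_seq) and not remi_seq[j].startswith('i-'):
--         j += 1
--     return seg_loop(remi_seq[j:])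
-- ===== Notes on version B (the rewrite author's own statement) =====
-- stated objective: alternative
-- what changed: Replaces A's single stateful scan with an in_seq flag by a segment decomposition: drop the prefix before the first 'i-' token, then recursively split the sequence into instrument-headed segments and, for each segment whose instrument is selected, emit its 'p-' tokens in order.
import Mathlib
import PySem

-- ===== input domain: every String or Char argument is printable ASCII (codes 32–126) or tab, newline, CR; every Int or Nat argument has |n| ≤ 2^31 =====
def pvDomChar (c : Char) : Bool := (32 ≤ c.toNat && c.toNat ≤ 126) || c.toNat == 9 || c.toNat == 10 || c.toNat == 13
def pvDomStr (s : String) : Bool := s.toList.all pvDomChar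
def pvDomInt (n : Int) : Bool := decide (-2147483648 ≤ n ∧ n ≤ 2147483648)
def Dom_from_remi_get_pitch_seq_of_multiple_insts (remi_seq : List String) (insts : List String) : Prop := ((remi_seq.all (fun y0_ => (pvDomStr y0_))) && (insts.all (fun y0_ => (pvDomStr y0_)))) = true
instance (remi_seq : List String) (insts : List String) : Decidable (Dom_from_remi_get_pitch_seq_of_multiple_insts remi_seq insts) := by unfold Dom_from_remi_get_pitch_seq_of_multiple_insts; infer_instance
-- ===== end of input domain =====

-- B replaces A's single stateful scan (in_seq flag) by a segment decomposition:
-- drop the prefix before the first 'i-' token, then walk instrument-headed segments,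
-- emitting each selected segment's 'p-' tokens in order (objective: alternative).

-- ===== PORT A =====
-- literal transliteration of A's loop: state (ret, in_seq)
def from_remi_get_pitch_seq_of_multiple_insts (remi_seq : List String) (insts : List String) : List String :=
  (remi_seq.foldl
    (fun (st : List String × Bool) tok =>
      if PySem.Str.startswith tok "i-" then
        if tok ∈ insts then (st.1, true) else (st.1, false)
      else if PySem.Str.startswith tok "p-" then
        if st.2 then (st.1 ++ [tok], st.2) else st
      else st)
    ([], false)).1

-- ===== PORT B =====
-- seg_loop of Source B: seq is empty or starts with an 'i-' token; the while loop that
-- collects body/rest is the takeWhile/dropWhile split at the next 'i-' token.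
def pvSegLoop (insts : List String) : List String → List String
  | [] => []
  | head :: tail =>
    let body := tail.takeWhile (fun t => !(PySem.Str.startswith t "i-"))
    let rest := tail.dropWhile (fun t => !(PySem.Str.startswith t "i-"))
    (if head ∈ insts then body.filter (fun t => PySem.Str.startswith t "p-") else []) ++
      pvSegLoop insts rest
  termination_by seq => seq.length
  decreasing_by
    simpa using Nat.lt_succ_of_le (List.length_dropWhile_le _ _)

def from_remi_get_pitch_seq_of_multiple_insts_alt (remi_seq : List String) (insts : List String) : List String :=
  pvSegLoop insts (remi_seq.dropWhile (fun t => !(PySem.Str.startswith t "i-")))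

-- ===== PRECONDITION & SPEC =====
def Spec_from_remi_get_pitch_seq_of_multiple_insts (remi_seq : List String) (insts : List String) (out : List String) : Prop := out = from_remi_get_pitch_seq_of_multiple_insts_alt remi_seq insts
instance (remi_seq : List String) (insts : List String) (out : List String) : Decidable (Spec_from_remi_get_pitch_seq_of_multiple_insts remi_seq insts out) := by unfold Spec_from_remi_get_pitch_seq_of_multiple_insts; infer_instance

-- ===== CLAIM (what is proved, stated in full; the proofs are below) =====
def Claim_equal_from_remi_get_pitch_seq_of_multiple_insts : Prop := ∀ (remi_seq : List String) (insts : List String), Dom_from_remi_get_pitch_seq_of_multiple_insts remi_seq insts → Spec_from_remi_get_pitch_seq_of_multiple_insts remi_seq insts (from_remi_get_pitch_seq_of_multiple_insts remi_seq insts)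

-- ===== LEMMAS AND PROOFS =====

-- direct recursive characterisation of A's fold
def pvARun (insts : List String) : List String → Bool → List String
  | [], _ => []
  | tok :: rest, b =>
    if PySem.Str.startswith tok "i-" then
      pvARun insts rest (tok ∈ insts)
    else if PySem.Str.startswith tok "p-" then
      (if b then [tok] else []) ++ pvARun insts rest b
    else
      pvARun insts rest b

theorem pv_dropWhile_shape {α : Type} (p : α → Bool) (l : List α) :
    l.dropWhile p = [] ∨ ∃ h t, l.dropWhile p = h :: t ∧ p h = false := by
  induction l with
  | nil => exact Or.inl rfl
  | cons a l ih =>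
    by_cases ha : p a
    · simpa [List.dropWhile, ha] using ih
    · right; exact ⟨a, l, by simp [List.dropWhile, ha], by simpa using ha⟩

theorem pvA_foldl_eq (insts : List String) :
    ∀ (seq : List String) (acc : List String) (b : Bool),
      (seq.foldl
        (fun (st : List String × Bool) tok =>
          if PySem.Str.startswith tok "i-" then
            if tok ∈ insts then (st.1, true) else (st.1, false)
          else if PySem.Str.startswith tok "p-" then
            if st.2 then (st.1 ++ [tok], st.2) else st
          else st)
        (acc, b)).1 = acc ++ pvARun insts seq b := by
  intro seq
  induction seq with
  | nil => intro acc b; simp [pvARun]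
  | cons tok rest ih =>
    intro acc b
    simp only [List.foldl_cons, pvARun]
    by_cases hi : PySem.Str.startswith tok "i-"
    · by_cases hm : tok ∈ insts <;> simp at hi <;> simp [hi, hm] <;> exact ih _ _
    · by_cases hp : PySem.Str.startswith tok "p-"
      · simp at hi hp
        cases b
        · simp [hi, hp]; exact ih _ _
        · simp [hi, hp]
          rw [show acc ++ tok :: pvARun insts rest true = (acc ++ [tok]) ++ pvARun insts rest true by simp]
          exact ih _ _
      · simp at hi hp; simp [hi, hp]; exact ih _ _

-- tokens before the first 'i-' token contribute nothing when the flag is false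
theorem pvARun_dropPrefix (insts : List String) :
    ∀ (seq : List String),
      pvARun insts seq false
        = pvARun insts (seq.dropWhile (fun t => !(PySem.Str.startswith t "i-"))) false := by
  intro seq
  induction seq with
  | nil => rfl
  | cons tok rest ih =>
    by_cases hi : PySem.Str.startswith tok "i-"
    · simp at hi; simp [List.dropWhile, hi]
    · by_cases hp : PySem.Str.startswith tok "p-" <;>
        simp at hi hp <;> simp [pvARun, List.dropWhile, hi, hp, ih]

-- a run over a segment splits as its body's 'p-' tokens (if the flag is on) plus the rest
theorem pvARun_segment (insts : List String) :
    ∀ (t : List String) (b : Bool),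
      pvARun insts t b
        = (if b then (t.takeWhile (fun s => !(PySem.Str.startswith s "i-"))).filter
              (fun s => PySem.Str.startswith s "p-") else [])
          ++ pvARun insts (t.dropWhile (fun s => !(PySem.Str.startswith s "i-"))) b := by
  intro t
  induction t with
  | nil => intro b; cases b <;> simp [pvARun]
  | cons tok rest ih =>
    intro b
    by_cases hi : PySem.Str.startswith tok "i-"
    · simp at hi; cases b <;> simp [pvARun, List.takeWhile, List.dropWhile, hi]
    · by_cases hp : PySem.Str.startswith tok "p-" <;>
        simp at hi hp <;> cases b <;>
        simp [pvARun, List.takeWhile, List.dropWhile, List.filter, hi, hp, ih]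

-- after the prefix drop, pvARun agrees with pvSegLoop whatever the incoming flag is
theorem pvARun_eq_segLoop (insts : List String) :
    ∀ (n : ℕ) (seq : List String), seq.length ≤ n →
      (seq = [] ∨ ∃ h t, seq = h :: t ∧ PySem.Str.startswith h "i-") →
      ∀ b, pvARun insts seq b = pvSegLoop insts seq := by
  intro n
  induction n with
  | zero =>
    intro seq hlen _ b
    have : seq = [] := List.length_eq_zero_iff.mp (Nat.le_zero.mp hlen)
    subst this; simp [pvARun, pvSegLoop]
  | succ n ih =>
    intro seq hlen hshape b
    rcases hshape with rfl | ⟨h, t, rfl, hi⟩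
    · simp [pvARun, pvSegLoop]
    · rw [pvSegLoop]
      simp only [pvARun, hi, if_pos]
      rw [pvARun_segment]
      congr 1
      · cases hm : decide (h ∈ insts) <;> simp_all
      · have hlen' : (t.dropWhile (fun s => !(PySem.Str.startswith s "i-"))).length ≤ n := by
          have h1 := List.length_dropWhile_le (fun s => !(PySem.Str.startswith s "i-")) t
          simp only [List.length_cons] at hlen
          omega
        have hshape' := pv_dropWhile_shape (fun s => !(PySem.Str.startswith s "i-")) t
        refine ih _ hlen' ?_ _
        rcases hshape' with he | ⟨h', t', heq, hph⟩
        · exact Or.inl he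
        · exact Or.inr ⟨h', t', heq, by simpa using hph⟩

-- ===== VERDICT (by name: the statement is the Claim_ definition above) =====
theorem from_remi_get_pitch_seq_of_multiple_insts_spec : Claim_equal_from_remi_get_pitch_seq_of_multiple_insts := by
  intro remi_seq insts _
  unfold Spec_from_remi_get_pitch_seq_of_multiple_insts
  unfold from_remi_get_pitch_seq_of_multiple_insts from_remi_get_pitch_seq_of_multiple_insts_alt
  rw [pvA_foldl_eq, List.nil_append, pvARun_dropPrefix]
  have hshape := pv_dropWhile_shape (fun t => !(PySem.Str.startswith t "i-")) remi_seq
  refine pvARun_eq_segLoop insts _ _ le_rfl ?_ false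
  rcases hshape with he | ⟨h', t', heq, hph⟩
  · exact Or.inl he
  · exact Or.inr ⟨h', t', heq, by simpa using hph⟩
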